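-- pv_equiv track=rewrite | github.com/thellost/soeta | utils.py | concatenate_name
-- ===== SOURCE A (Python) =====
-- def concatenate_name(name_list):
--     name_list_len = len(name_list)
--     if name_list_len > 3:
--
--         division = name_list_len // 3
--
--         if (name_list_len % 3 != 0):
--             division += 1
--
--         temp_name_list = [""] * division
--         idx = 0
--         num = 0
--         for name in name_list:
--             if (num % 3 == 0 and num != 0):
--                 idx += 1
--                 num = 0
--             temp_name_list[idx] = temp_name_list[idx] + str(name) + " "
--             num += 1
--         return temp_name_list
--     else:
--         return name_list
-- ===== SOURCE B (Python) =====
-- def concatenate_name(name_list):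
--     if len(name_list) <= 3:
--         return name_list
--     result = []
--     for i in range(0, len(name_list), 3):
--         chunk = name_list[i:i + 3]
--         result.append(''.join(str(n) + ' ' for n in chunk))
--     return result
-- ===== Notes on version B (the rewrite author's own statement) =====
-- stated objective: simpler
-- what changed: Replaces the preallocated output buffer with modulo counter and manual index bookkeeping by a direct chunked traversal: slice three names at a time and join each slice.
import Mathlib
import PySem

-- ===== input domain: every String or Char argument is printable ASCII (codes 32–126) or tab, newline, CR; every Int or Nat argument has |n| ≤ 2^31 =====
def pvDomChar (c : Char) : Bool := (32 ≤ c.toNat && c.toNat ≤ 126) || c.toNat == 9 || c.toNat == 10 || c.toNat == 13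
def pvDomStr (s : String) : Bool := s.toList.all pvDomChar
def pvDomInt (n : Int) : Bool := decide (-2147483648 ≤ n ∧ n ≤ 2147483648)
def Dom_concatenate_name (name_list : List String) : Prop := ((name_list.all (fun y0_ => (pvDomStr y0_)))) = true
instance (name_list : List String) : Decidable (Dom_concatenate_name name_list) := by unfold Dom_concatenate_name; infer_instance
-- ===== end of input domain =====

-- B replaces A's preallocated buffer + modulo-counter bookkeeping by a direct
-- chunked traversal (take 3 / join / recurse on the rest); same values, simpler code.

-- ===== PORT A =====
-- one step of A's for-loop over (temp_name_list, idx, num)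
def pvStepA (st : List String × Nat × Nat) (name : String) : List String × Nat × Nat :=
  let (temp, idx, num) := st
  let (idx, num) := if num % 3 = 0 ∧ num ≠ 0 then (idx + 1, 0) else (idx, num)
  (temp.set idx ((temp.getD idx "") ++ name ++ " "), idx, num + 1)

def concatenate_name (name_list : List String) : List String :=
  let name_list_len := name_list.length
  if name_list_len > 3 then
    let division := name_list_len / 3
    let division := if name_list_len % 3 ≠ 0 then division + 1 else division
    let temp_name_list := List.replicate division ""
    (name_list.foldl pvStepA (temp_name_list, 0, 0)).1
  else
    name_list

-- ===== PORT B =====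
-- ''.join(str(n) + ' ' for n in chunk)
def pvJoinChunk (chunk : List String) : String :=
  chunk.foldl (fun acc n => acc ++ n ++ " ") ""

-- the `for i in range(0, len, 3)` loop: take a 3-slice, join it, recurse on the rest
def pvChunks : List String → List String
  | [] => []
  | a :: t => pvJoinChunk ((a :: t).take 3) :: pvChunks ((a :: t).drop 3)
termination_by l => l.length
decreasing_by simp

def concatenate_name_alt (name_list : List String) : List String :=
  if name_list.length ≤ 3 then name_list else pvChunks name_list

-- ===== PRECONDITION & SPEC =====
def Spec_concatenate_name (name_list : List String) (out : List String) : Prop := out = concatenate_name_alt name_list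
instance (name_list : List String) (out : List String) : Decidable (Spec_concatenate_name name_list out) := by unfold Spec_concatenate_name; infer_instance

-- ===== CLAIM (what is proved, stated in full; the proofs are below) =====
def Claim_equal_concatenate_name : Prop := ∀ (name_list : List String), Dom_concatenate_name name_list → Spec_concatenate_name name_list (concatenate_name name_list)

-- ===== LEMMAS AND PROOFS =====

theorem pvChunks_nil : pvChunks [] = [] := by rw [pvChunks]

theorem pvChunks_cons (a : String) (t : List String) :
    pvChunks (a :: t) = pvJoinChunk ((a :: t).take 3) :: pvChunks ((a :: t).drop 3) := by
  rw [pvChunks]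

theorem pvWrap (t : List String) (temp : List String) (i : Nat) :
    (t.foldl pvStepA (temp, i, 3)).1 = (t.foldl pvStepA (temp, i + 1, 0)).1 := by
  cases t with
  | nil => rfl
  | cons h t' =>
    have : pvStepA (temp, i, 3) h = pvStepA (temp, i + 1, 0) h := by
      simp [pvStepA]
    simp [List.foldl, this]

-- main invariant: at a chunk boundary, A's loop fills the remaining blank slots with B's chunks
theorem pvLoop_eq (l : List String) (done : List String) :
    (l.foldl pvStepA (done ++ List.replicate ((l.length + 2) / 3) "", done.length, 0)).1
      = done ++ pvChunks l := by
  match l with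
  | [] => simp [pvChunks_nil]
  | [a] =>
    simp [List.foldl, pvStepA, pvChunks_cons, pvChunks_nil, pvJoinChunk]
  | [a, b] =>
    simp only [List.foldl, pvStepA, List.length_cons, List.length_nil]
    norm_num [pvChunks_cons, pvChunks_nil, pvJoinChunk]
  | a :: b :: c :: t =>
    have hm : ((a :: b :: c :: t).length + 2) / 3 = (t.length + 2) / 3 + 1 := by
      simp only [List.length_cons]; omega
    rw [hm]
    simp only [List.replicate, List.foldl]
    have step3 : ∀ (z : String),
        (pvStepA (pvStepA (pvStepA (done ++ z :: List.replicate ((t.length + 2) / 3) "", done.length, 0) a) b) c)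
          = (done ++ (z ++ a ++ " " ++ b ++ " " ++ c ++ " ") :: List.replicate ((t.length + 2) / 3) "", done.length, 3) := by
      intro z
      simp [pvStepA]
    rw [step3 ""]
    have hchunk : pvChunks (a :: b :: c :: t)
        = ("" ++ a ++ " " ++ b ++ " " ++ c ++ " ") :: pvChunks t := by
      simp [pvChunks_cons, pvJoinChunk]
    rw [hchunk, pvWrap]
    have hdone : done ++ ("" ++ a ++ " " ++ b ++ " " ++ c ++ " ") :: List.replicate ((t.length + 2) / 3) ""
        = (done ++ [("" ++ a ++ " " ++ b ++ " " ++ c ++ " ")]) ++ List.replicate ((t.length + 2) / 3) "" := by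
      simp
    have hlen : done.length + 1 = (done ++ [("" ++ a ++ " " ++ b ++ " " ++ c ++ " ")]).length := by
      simp
    rw [hdone, hlen, pvLoop_eq t (done ++ [("" ++ a ++ " " ++ b ++ " " ++ c ++ " ")])]
    simp
termination_by l.length

-- ===== VERDICT (by name: the statement is the Claim_ definition above) =====
theorem concatenate_name_spec : Claim_equal_concatenate_name := by
  intro name_list _
  unfold Spec_concatenate_name concatenate_name concatenate_name_alt
  by_cases h : name_list.length > 3
  · have hdiv : (if name_list.length % 3 ≠ 0 then name_list.length / 3 + 1 else name_list.length / 3)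
        = (name_list.length + 2) / 3 := by
      split <;> omega
    simp only [h, if_pos, if_neg (by omega : ¬ name_list.length ≤ 3)]
    rw [hdiv]
    simpa using pvLoop_eq name_list []
  · simp [h, if_pos (by omega : name_list.length ≤ 3)]
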